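-- pv_equiv track=rewrite | github.com/Dapheureux/generatorQR | main.py | determine_encoding_mode
-- ===== SOURCE A (Python) =====
-- def determine_encoding_mode(data):
--     if any(char.isdigit() for char in data):
--         return 'numeric'
--     elif any(char.isalpha() for char in data):
--         return 'alphanumeric'
--     elif any(char.encode('utf-8') for char in data):
--         return 'byte'
--     elif any(ord(char) > 127 for char in data):
--         return 'kanji'
--     else:
--         raise ValueError("Impossible de déterminer le mode pour les données fournies.")
-- ===== SOURCE B (Python) =====
-- def determine_encoding_mode(data):
--     has_digit = False
--     has_alpha = False
--     seen = False
--     for char in data: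
--         seen = True
--         if char.isdigit():
--             has_digit = True
--         if char.isalpha():
--             has_alpha = True
--     if has_digit:
--         return 'numeric'
--     if has_alpha:
--         return 'alphanumeric'
--     if seen:
--         return 'byte'
--     raise ValueError("Impossible de déterminer le mode pour les données fournies.")
-- ===== Notes on version B (the rewrite author's own statement) =====
-- stated objective: alternative
-- what changed: Replaces A's up-to-three separate short-circuit any() scans (and its dead kanji branch) with a single classifying pass that sets has_digit/has_alpha/seen flags and decides the mode once after the loop.
import Mathlib
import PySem

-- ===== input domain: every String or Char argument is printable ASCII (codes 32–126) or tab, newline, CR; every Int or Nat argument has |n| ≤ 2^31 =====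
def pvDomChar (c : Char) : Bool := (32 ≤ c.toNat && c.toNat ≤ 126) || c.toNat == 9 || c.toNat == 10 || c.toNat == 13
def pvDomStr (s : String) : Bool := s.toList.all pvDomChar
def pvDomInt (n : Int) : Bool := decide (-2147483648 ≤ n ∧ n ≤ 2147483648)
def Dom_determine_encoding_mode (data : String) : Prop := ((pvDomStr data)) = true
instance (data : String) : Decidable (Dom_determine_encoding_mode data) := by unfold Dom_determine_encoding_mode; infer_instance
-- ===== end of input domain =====

-- B replaces A's separate short-circuit any() scans with one flag-setting pass; equal return values on non-empty input (both raise on "").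


-- ===== PORT A =====
-- char.encode('utf-8') is a non-empty bytes object for every char, hence always truthy
def determine_encoding_mode (data : String) : String :=
  if data.toList.any PySem.Chars.isdigit then "numeric"
  else if data.toList.any PySem.Chars.isalpha then "alphanumeric"
  else if data.toList.any (fun _ => true) then "byte"
  else if data.toList.any (fun c => decide (c.toNat > 127)) then "kanji"
  else ""  -- unreachable under Pre_: Python raises ValueError here (data = "")

-- ===== PORT B =====
-- one pass maintaining (seen, has_digit, has_alpha)
def demStep (st : Bool × Bool × Bool) (c : Char) : Bool × Bool × Bool :=
  (true, st.2.1 || PySem.Chars.isdigit c, st.2.2 || PySem.Chars.isalpha c)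

def determine_encoding_mode_alt (data : String) : String :=
  let st := data.toList.foldl demStep (false, false, false)
  if st.2.1 then "numeric"
  else if st.2.2 then "alphanumeric"
  else if st.1 then "byte"
  else ""  -- unreachable under Pre_: Python raises ValueError here (data = "")

-- ===== PRECONDITION & SPEC =====
-- Pre_ excludes exactly the empty string, on which both Pythons raise ValueError.
def Pre_determine_encoding_mode (data : String) : Prop := data ≠ ""
instance (data : String) : Decidable (Pre_determine_encoding_mode data) := by
  unfold Pre_determine_encoding_mode; infer_instance
def pvWitness_determine_encoding_mode : String := "a"

def Spec_determine_encoding_mode (data : String) (out : String) : Prop := out = determine_encoding_mode_alt data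
instance (data : String) (out : String) : Decidable (Spec_determine_encoding_mode data out) := by unfold Spec_determine_encoding_mode; infer_instance

-- ===== CLAIM (what is proved, stated in full; the proofs are below) =====
def Claim_equal_determine_encoding_mode : Prop := ∀ (data : String), Dom_determine_encoding_mode data → Pre_determine_encoding_mode data → Spec_determine_encoding_mode data (determine_encoding_mode data)

-- ===== LEMMAS AND PROOFS =====
lemma demStep_fold (l : List Char) (s d a : Bool) :
    l.foldl demStep (s, d, a) =
      (s || !l.isEmpty, d || l.any PySem.Chars.isdigit, a || l.any PySem.Chars.isalpha) := by
  induction l generalizing s d a with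
  | nil => simp
  | cons c t ih =>
      simp [List.foldl, demStep, ih, Bool.or_assoc]

-- ===== VERDICT (by name: the statement is the Claim_ definition above) =====
theorem determine_encoding_mode_spec : Claim_equal_determine_encoding_mode := by
  intro data _ hpre
  have hne : data.toList ≠ [] := by
    intro h
    apply hpre
    have := congrArg String.ofList h
    simpa using this
  unfold Spec_determine_encoding_mode determine_encoding_mode determine_encoding_mode_alt
  rw [demStep_fold]
  simp only [Bool.false_or]
  have hany : data.toList.any (fun _ => true) = true := by
    cases h : data.toList with
    | nil => exact absurd h hne
    | cons c t => simp
  have hemp : (!data.toList.isEmpty) = true := by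
    cases h : data.toList with
    | nil => exact absurd h hne
    | cons c t => simp
  by_cases hd : data.toList.any PySem.Chars.isdigit = true <;>
  by_cases ha : data.toList.any PySem.Chars.isalpha = true <;>
    simp [hd, ha, hany, hemp]
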